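-- pv_equiv track=rewrite | github.com/anand-371/practice-problems | adv test preps/k flip cols.py | flip_count
-- ===== SOURCE A (Python) =====
-- import copy
--
-- def flip_count(arr,grid):
--     temp_grid=copy.deepcopy(grid)
--     for j in range(len(arr)):
--         if(arr[j]==1):
--             for i in range(len(grid)):
--                 temp_grid[i][j]=1-temp_grid[i][j]
--     final_row_count=0
--     for i in range(len(temp_grid)):
--         count=0
--         for j in range(len(temp_grid[0])):
--             if(temp_grid[i][j]==1):
--                 count+=1
--         if(count==len(temp_grid[0])):
--             final_row_count+=1
--     return final_row_count
-- ===== SOURCE B (Python) =====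
-- def flip_count(arr, grid):
--     if not grid:
--         return 0
--     w = len(grid[0])
--     target = [0 if j < len(arr) and arr[j] == 1 else 1 for j in range(w)]
--     return sum(1 for row in grid if row[:w] == target)
-- ===== Notes on version B (the rewrite author's own statement) =====
-- stated objective: simpler
-- what changed: B drops the deepcopy and the in-place column-flipping pass entirely: it precomputes the target row (0 where a flipped column must be, 1 elsewhere) once and counts in a single read-only pass the rows whose prefix of length len(grid[0]) equals it.
import Mathlib
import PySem

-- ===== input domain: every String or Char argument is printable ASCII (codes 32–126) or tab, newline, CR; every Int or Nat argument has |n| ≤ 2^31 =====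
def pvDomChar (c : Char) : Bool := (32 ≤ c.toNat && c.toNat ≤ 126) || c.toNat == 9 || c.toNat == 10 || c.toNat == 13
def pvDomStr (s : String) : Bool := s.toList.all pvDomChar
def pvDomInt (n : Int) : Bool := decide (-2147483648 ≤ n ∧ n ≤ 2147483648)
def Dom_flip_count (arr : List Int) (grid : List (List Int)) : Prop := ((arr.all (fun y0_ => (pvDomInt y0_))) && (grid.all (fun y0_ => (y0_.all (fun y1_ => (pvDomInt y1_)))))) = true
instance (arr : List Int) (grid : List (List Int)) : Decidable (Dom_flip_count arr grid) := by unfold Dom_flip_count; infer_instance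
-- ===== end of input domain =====

-- B replaces A's deepcopy-flip-then-count (two passes with in-place column mutation) by a
-- single read-only pass comparing each row's prefix against a precomputed target row (simpler).

-- ===== PORT A =====
-- temp_grid[i][j]=1-temp_grid[i][j] and the later reads raise IndexError out of range in Python;
-- those inputs are excluded by Pre_, the port uses getD/set (no-op / default) there.
def flip_count (arr : List Int) (grid : List (List Int)) : Int :=
  let temp := (List.range arr.length).foldl (fun tg j =>
    if arr.getD j 0 = 1 then
      (List.range grid.length).foldl (fun tg2 i =>
        tg2.set i ((tg2.getD i []).set j (1 - (tg2.getD i []).getD j 0))) tg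
    else tg) grid
  (List.range temp.length).foldl (fun acc i =>
    let w := (temp.getD 0 []).length
    let cnt := (List.range w).foldl (fun c j =>
      if (temp.getD i []).getD j 0 = 1 then c + 1 else c) (0 : Int)
    if cnt = (w : Int) then acc + 1 else acc) (0 : Int)

-- ===== PORT B =====
def flip_count_alt (arr : List Int) (grid : List (List Int)) : Int :=
  if grid = [] then 0
  else
    let w := (grid.getD 0 []).length
    let target := (List.range w).map (fun j => if j < arr.length ∧ arr.getD j 0 = 1 then (0 : Int) else 1)
    grid.foldl (fun acc row => if PySem.List.slice row none (some (w : Int)) = target then acc + 1 else acc) 0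

-- ===== PRECONDITION & SPEC =====
-- Pre_ excludes exactly the inputs on which A raises IndexError: a column j with arr[j]==1
-- reaching past the end of some row (the flip assignment raises), or a row shorter than
-- len(grid[0]) (the count loop's read raises).
def Pre_flip_count (arr : List Int) (grid : List (List Int)) : Prop :=
  (∀ j ∈ List.range arr.length, arr.getD j 0 = 1 → ∀ row ∈ grid, j < row.length) ∧
  (∀ row ∈ grid, (grid.getD 0 []).length ≤ row.length)
instance (arr : List Int) (grid : List (List Int)) : Decidable (Pre_flip_count arr grid) := by unfold Pre_flip_count; infer_instance
def pvWitness_flip_count : List Int × List (List Int) := ([1, 0], [[0, 1], [1, 1], [0, 0]])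

def Spec_flip_count (arr : List Int) (grid : List (List Int)) (out : Int) : Prop := out = flip_count_alt arr grid
instance (arr : List Int) (grid : List (List Int)) (out : Int) : Decidable (Spec_flip_count arr grid out) := by unfold Spec_flip_count; infer_instance

-- ===== CLAIM (what is proved, stated in full; the proofs are below) =====
def Claim_equal_flip_count : Prop := ∀ (arr : List Int) (grid : List (List Int)), Dom_flip_count arr grid → Pre_flip_count arr grid → Spec_flip_count arr grid (flip_count arr grid)

-- ===== LEMMAS AND PROOFS =====

-- length/element characterisation of the per-row flip loop
theorem flipFold_length (arr row : List Int) (m : ℕ) :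
    ((List.range m).foldl (fun r j => if arr.getD j 0 = 1 then r.set j (1 - r.getD j 0) else r) row).length
      = row.length := by
  induction m with
  | zero => simp
  | succ m ih =>
    rw [List.range_succ, List.foldl_append, List.foldl_cons, List.foldl_nil]
    split_ifs
    · rw [List.length_set]; exact ih
    · exact ih

theorem flipFold_getElem? (arr row : List Int) (m k : ℕ) :
    ((List.range m).foldl (fun r j => if arr.getD j 0 = 1 then r.set j (1 - r.getD j 0) else r) row)[k]? =
      if k < m ∧ arr.getD k 0 = 1 then row[k]?.map (fun v => 1 - v) else row[k]? := by
  induction m with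
  | zero => simp
  | succ m ih =>
    rw [List.range_succ, List.foldl_append, List.foldl_cons, List.foldl_nil]
    set R := (List.range m).foldl (fun r j => if arr.getD j 0 = 1 then r.set j (1 - r.getD j 0) else r) row with hR
    have hlen : R.length = row.length := flipFold_length arr row m
    by_cases hc : arr.getD m 0 = 1
    · rw [if_pos hc, List.getElem?_set]
      by_cases hk : m = k
      · subst hk
        have hRm : R[m]? = row[m]? := by rw [ih]; simp
        by_cases hm : m < row.length
        · rw [if_pos (by omega : m < R.length), if_pos rfl]
          have hv : R.getD m 0 = row[m] := by
            rw [List.getD_eq_getElem?_getD, hRm, List.getElem?_eq_getElem hm]; rfl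
          rw [hv, if_pos ⟨by omega, hc⟩, List.getElem?_eq_getElem hm]
          rfl
        · rw [if_neg (by omega : ¬ m < R.length), if_pos rfl,
            List.getElem?_eq_none (by omega : row.length ≤ m)]
          split_ifs <;> rfl
      · rw [if_neg hk, ih]
        have hiff : (k < m ∧ arr.getD k 0 = 1) ↔ (k < m + 1 ∧ arr.getD k 0 = 1) := by
          constructor
          · exact fun ⟨h1, h2⟩ => ⟨Nat.lt_succ_of_lt h1, h2⟩
          · rintro ⟨h1, h2⟩
            exact ⟨by omega, h2⟩
        exact if_congr hiff rfl rfl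
    · rw [if_neg hc, ih]
      have hiff : (k < m ∧ arr.getD k 0 = 1) ↔ (k < m + 1 ∧ arr.getD k 0 = 1) := by
        constructor
        · exact fun ⟨h1, h2⟩ => ⟨Nat.lt_succ_of_lt h1, h2⟩
        · rintro ⟨h1, h2⟩
          refine ⟨?_, h2⟩
          rcases Nat.lt_succ_iff_lt_or_eq.mp h1 with h | h
          · exact h
          · exact absurd (h ▸ h2) hc
      exact if_congr hiff rfl rfl

-- the column loop writes each row independently: characterisation of one column pass
theorem innerFold_length (g : List Int → List Int) (n : ℕ) (tg : List (List Int)) :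
    ((List.range n).foldl (fun tg2 i => tg2.set i (g (tg2.getD i []))) tg).length = tg.length := by
  induction n with
  | zero => simp
  | succ n ih =>
    rw [List.range_succ, List.foldl_append, List.foldl_cons, List.foldl_nil, List.length_set]
    exact ih

theorem innerFold_getElem? (g : List Int → List Int) (n k : ℕ) (tg : List (List Int)) :
    ((List.range n).foldl (fun tg2 i => tg2.set i (g (tg2.getD i []))) tg)[k]? =
      if k < n then tg[k]?.map g else tg[k]? := by
  induction n with
  | zero => simp
  | succ n ih =>
    rw [List.range_succ, List.foldl_append, List.foldl_cons, List.foldl_nil]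
    set X := (List.range n).foldl (fun tg2 i => tg2.set i (g (tg2.getD i []))) tg with hX
    have hlen : X.length = tg.length := innerFold_length g n tg
    rw [List.getElem?_set]
    by_cases hk : n = k
    · subst hk
      have hXn : X[n]? = tg[n]? := by rw [ih]; simp
      by_cases hn : n < tg.length
      · rw [if_pos (by omega : n < X.length), if_pos rfl, if_pos (by omega : n < n + 1)]
        have hv : X.getD n [] = tg[n] := by
          rw [List.getD_eq_getElem?_getD, hXn, List.getElem?_eq_getElem hn]; rfl
        rw [hv, List.getElem?_eq_getElem hn]
        rfl
      · rw [if_neg (by omega : ¬ n < X.length), if_pos rfl,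
          List.getElem?_eq_none (by omega : tg.length ≤ n)]
        split_ifs <;> rfl
    · rw [if_neg hk, ih]
      exact if_congr (by omega) rfl rfl

-- A's temp grid is grid with the per-row flip transform applied to every row
theorem outerFold_getElem? (arr : List Int) (grid : List (List Int)) (m i : ℕ) :
    ((List.range m).foldl (fun tg j =>
      if arr.getD j 0 = 1 then
        (List.range grid.length).foldl (fun tg2 i2 =>
          tg2.set i2 ((tg2.getD i2 []).set j (1 - (tg2.getD i2 []).getD j 0))) tg
      else tg) grid)[i]? =
      grid[i]?.map (fun row =>
        (List.range m).foldl (fun r j => if arr.getD j 0 = 1 then r.set j (1 - r.getD j 0) else r) row) := by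
  induction m with
  | zero => cases h : grid[i]? <;> simp [h]
  | succ m ih =>
    simp only [List.range_succ, List.foldl_append, List.foldl_cons, List.foldl_nil]
    set T := (List.range m).foldl (fun tg j =>
      if arr.getD j 0 = 1 then
        (List.range grid.length).foldl (fun tg2 i2 =>
          tg2.set i2 ((tg2.getD i2 []).set j (1 - (tg2.getD i2 []).getD j 0))) tg
      else tg) grid with hT
    have hInner := innerFold_getElem? (fun r => r.set m (1 - r.getD m 0)) grid.length i T
    simp only [] at hInner
    cases hg : grid[i]? with
    | none =>
      have hi : grid.length ≤ i := by
        rcases Nat.lt_or_ge i grid.length with h | h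
        · rw [List.getElem?_eq_getElem h] at hg; cases hg
        · exact h
      have hTi : T[i]? = none := by rw [ih, hg]; rfl
      split_ifs with hc
      · rw [hInner, if_neg (by omega), hTi]; rfl
      · rw [hTi]; rfl
    | some row =>
      have hi : i < grid.length := by
        by_contra h
        rw [List.getElem?_eq_none (by omega)] at hg; cases hg
      have hTi : T[i]? = some ((List.range m).foldl
          (fun r j => if arr.getD j 0 = 1 then r.set j (1 - r.getD j 0) else r) row) := by
        rw [ih, hg]; rfl
      simp only [Option.map_some]
      split_ifs with hc
      · rw [hInner, if_pos hi, hTi]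
        simp only [Option.map_some]
      · exact hTi

theorem outerFold_length (arr : List Int) (grid : List (List Int)) (m : ℕ) :
    ((List.range m).foldl (fun tg j =>
      if arr.getD j 0 = 1 then
        (List.range grid.length).foldl (fun tg2 i2 =>
          tg2.set i2 ((tg2.getD i2 []).set j (1 - (tg2.getD i2 []).getD j 0))) tg
      else tg) grid).length = grid.length := by
  induction m with
  | zero => simp
  | succ m ih =>
    simp only [List.range_succ, List.foldl_append, List.foldl_cons, List.foldl_nil]
    set T := (List.range m).foldl (fun tg j =>
      if arr.getD j 0 = 1 then
        (List.range grid.length).foldl (fun tg2 i2 =>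
          tg2.set i2 ((tg2.getD i2 []).set j (1 - (tg2.getD i2 []).getD j 0))) tg
      else tg) grid with hT
    have hInner := innerFold_length (fun r => r.set m (1 - r.getD m 0)) grid.length T
    simp only [] at hInner
    split_ifs with hc
    · rw [hInner]; exact ih
    · exact ih

-- both counting loops are countP
theorem foldl_countIf {α : Type} (l : List α) (p : α → Prop) [DecidablePred p] (acc : Int) :
    l.foldl (fun a x => if p x then a + 1 else a) acc = acc + (l.countP (fun x => decide (p x)) : Int) := by
  induction l generalizing acc with
  | nil => simp
  | cons x xs ih =>
    simp only [List.foldl_cons, List.countP_cons, ih]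
    by_cases h : p x <;> simp [h] <;> push_cast <;> ring

theorem countP_range_getD {α : Type} [Inhabited α] (xs : List α) (d : α) (p : α → Bool) :
    (List.range xs.length).countP (fun i => p (xs.getD i d)) = xs.countP p := by
  induction xs with
  | nil => simp
  | cons x xs ih =>
    rw [List.length_cons, List.range_succ_eq_map]
    simp only [List.countP_cons, List.countP_map, Function.comp_def, List.getD_cons_succ,
      List.getD_cons_zero, ih]

theorem row_iff (arr row : List Int) (w : ℕ) (hwle : w ≤ row.length) :
    ((∀ j ∈ List.range w,
        ((List.range arr.length).foldl
          (fun r j => if arr.getD j 0 = 1 then r.set j (1 - r.getD j 0) else r) row).getD j 0 = 1)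
      ↔ row.take w = (List.range w).map (fun j => if j < arr.length ∧ arr.getD j 0 = 1 then (0 : Int) else 1)) := by
  have key : ∀ j, j < w →
      ((((List.range arr.length).foldl
          (fun r j => if arr.getD j 0 = 1 then r.set j (1 - r.getD j 0) else r) row).getD j 0 = 1)
        ↔ row[j]? = some (if j < arr.length ∧ arr.getD j 0 = 1 then (0 : Int) else 1)) := by
    intro j hj
    have hjr : j < row.length := lt_of_lt_of_le hj hwle
    have hv : row[j]? = some row[j] := List.getElem?_eq_getElem hjr
    rw [List.getD_eq_getElem?_getD, flipFold_getElem?, hv]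
    by_cases hc : j < arr.length ∧ arr.getD j 0 = 1
    · rw [if_pos hc, if_pos hc]
      simp only [Option.map_some, Option.getD_some, Option.some.injEq]
      omega
    · rw [if_neg hc, if_neg hc]
      simp only [Option.getD_some, Option.some.injEq]
  constructor
  · intro h
    apply List.ext_getElem?
    intro j
    by_cases hj : j < w
    · rw [List.getElem?_take, if_pos hj, List.getElem?_map, List.getElem?_range hj,
        Option.map_some]
      exact (key j hj).mp (h j (List.mem_range.mpr hj))
    · rw [List.getElem?_take, if_neg hj, List.getElem?_map,
        List.getElem?_eq_none (by rw [List.length_range]; omega)]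
      rfl
  · intro h j hjmem
    rw [List.mem_range] at hjmem
    apply (key j hjmem).mpr
    have := congrArg (fun l => l[j]?) h
    simp only [List.getElem?_take, List.getElem?_map, List.getElem?_range hjmem,
      if_pos hjmem, Option.map_some] at this
    exact this

-- ===== VERDICT (by name: the statement is the Claim_ definition above) =====
theorem flip_count_spec : Claim_equal_flip_count := by
  intro arr grid _ hpre
  obtain ⟨hpre1, hpre2⟩ := hpre
  unfold Spec_flip_count flip_count flip_count_alt
  dsimp only
  by_cases hg : grid = []
  · subst hg
    simp
  · rw [if_neg hg]
    set temp := (List.range arr.length).foldl (fun tg j =>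
      if arr.getD j 0 = 1 then
        (List.range grid.length).foldl (fun tg2 i =>
          tg2.set i ((tg2.getD i []).set j (1 - (tg2.getD i []).getD j 0))) tg
      else tg) grid with htempdef
    have h0len : 0 < grid.length := List.length_pos_of_ne_nil hg
    have htemp : ∀ i : ℕ, temp[i]? = grid[i]?.map (fun row =>
        (List.range arr.length).foldl
          (fun r j => if arr.getD j 0 = 1 then r.set j (1 - r.getD j 0) else r) row) :=
      fun i => outerFold_getElem? arr grid arr.length i
    have htlen : temp.length = grid.length := outerFold_length arr grid arr.length
    have hg0 : grid[0]? = some (grid.getD 0 []) := by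
      rw [List.getElem?_eq_getElem h0len, List.getD_eq_getElem?_getD,
        List.getElem?_eq_getElem h0len]
      rfl
    have hw : (temp.getD 0 []).length = (grid.getD 0 []).length := by
      rw [List.getD_eq_getElem?_getD, htemp 0, hg0, Option.map_some, Option.getD_some]
      exact flipFold_length arr (grid.getD 0 []) arr.length
    simp only [hw, htlen]
    have hA := foldl_countIf (List.range grid.length)
      (fun i => (List.range (grid.getD 0 []).length).foldl
        (fun c j => if (temp.getD i []).getD j 0 = 1 then c + 1 else c) 0 = ((grid.getD 0 []).length : Int)) 0
    simp only [] at hA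
    rw [hA]
    have hB := foldl_countIf grid
      (fun row => PySem.List.slice row none (some ((grid.getD 0 []).length : Int)) =
        (List.range (grid.getD 0 []).length).map
          (fun j => if j < arr.length ∧ arr.getD j 0 = 1 then (0 : Int) else 1)) 0
    simp only [] at hB
    rw [hB]
    simp only [zero_add]
    have hswap := countP_range_getD grid ([] : List Int)
      (fun row => decide (PySem.List.slice row none (some ((grid.getD 0 []).length : Int)) =
        (List.range (grid.getD 0 []).length).map
          (fun j => if j < arr.length ∧ arr.getD j 0 = 1 then (0 : Int) else 1)))
    simp only [] at hswap
    rw [← hswap]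
    have hcast : ∀ a b : ℕ, a = b → (a : Int) = (b : Int) := fun a b h => by omega
    apply hcast
    apply List.countP_congr
    intro i hi
    rw [List.mem_range] at hi
    have hrow : grid.getD i [] = grid[i] := by
      rw [List.getD_eq_getElem?_getD, List.getElem?_eq_getElem hi]; rfl
    have htempi : temp.getD i [] = (List.range arr.length).foldl
        (fun r j => if arr.getD j 0 = 1 then r.set j (1 - r.getD j 0) else r) (grid.getD i []) := by
      rw [List.getD_eq_getElem?_getD, htemp i, List.getElem?_eq_getElem hi, Option.map_some,
        Option.getD_some, hrow]
    have hmem : grid.getD i [] ∈ grid := by rw [hrow]; exact List.getElem_mem hi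
    have hwle : (grid.getD 0 []).length ≤ (grid.getD i []).length := hpre2 _ hmem
    simp only [decide_eq_true_eq]
    have hC := foldl_countIf (List.range (grid.getD 0 []).length)
      (fun j => (temp.getD i []).getD j 0 = 1) 0
    simp only [] at hC
    rw [hC]
    rw [PySem.List.slice_to_natCast]
    have h1 : ∀ a b : ℕ, (((0 : Int) + (a : Int) = (b : Int)) ↔ a = b) := by intro a b; omega
    rw [h1]
    have h2 : ∀ (p : ℕ → Bool) (n : ℕ),
        (((List.range n).countP p = n) ↔ ∀ j ∈ List.range n, p j = true) := by
      intro p n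
      constructor
      · intro hh
        exact List.countP_eq_length.mp (by rw [List.length_range]; exact hh)
      · intro hh
        have := List.countP_eq_length.mpr hh
        rw [List.length_range] at this
        exact this
    rw [h2]
    simp only [decide_eq_true_eq, htempi]
    exact row_iff arr (grid.getD i []) (grid.getD 0 []).length hwle
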